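-- pv_equiv track=rewrite | github.com/anantghuman/GIT-RAG | dag_utils.py | get_commit_depth
-- ===== SOURCE A (Python) =====
-- def get_commit_depth(sha, commit_graph, cache=None):
--     """Calculate the depth of a commit (distance from root)"""
--     if cache is None:
--         cache = {}
--
--     if sha in cache:
--         return cache[sha]
--
--     commit = commit_graph.get(sha)
--     if not commit or not commit['parents']:
--         depth = 0
--     else:
--         depth = 1 + max(get_commit_depth(p, commit_graph, cache)
--                        for p in commit['parents'] if p in commit_graph)
--
--     cache[sha] = depth
--     return depth
-- ===== SOURCE B (Python) =====
-- def get_commit_depth(sha, commit_graph, cache=None):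
--     """Calculate the depth of a commit (distance from root).
--
--     Bottom-up saturation instead of top-down recursion: repeatedly sweep the
--     graph and resolve every node whose in-graph parents are all resolved,
--     until sha is resolved or nothing changes.  (Return-value equivalence:
--     unlike A, this writes only sha's entry into the caller's cache.)
--     """
--     if cache is None:
--         cache = {}
--     if sha in cache:
--         return cache[sha]
--     depths = dict(cache)
--     changed = True
--     while changed and sha not in depths:
--         changed = False
--         for node, commit in commit_graph.items():
--             if node in depths:
--                 continue
--             parents = [p for p in (commit.get('parents') or []) if p in commit_graph]
--             if all(p in depths for p in parents):
--                 depths[node] = 0 if not parents else 1 + max(depths[p] for p in parents)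
--                 changed = True
--     depth = depths.get(sha, 0)
--     cache[sha] = depth
--     return depth
-- ===== Notes on version B (the rewrite author's own statement) =====
-- stated objective: alternative
-- what changed: Replaces A's top-down memoised recursion over parent links by an iterative bottom-up saturation sweep: repeated passes over the graph resolve every node whose in-graph parents are already resolved, until sha is resolved or nothing changes (return value only; A fills the caller's cache with every visited node, B writes only sha's entry).
import Mathlib
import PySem

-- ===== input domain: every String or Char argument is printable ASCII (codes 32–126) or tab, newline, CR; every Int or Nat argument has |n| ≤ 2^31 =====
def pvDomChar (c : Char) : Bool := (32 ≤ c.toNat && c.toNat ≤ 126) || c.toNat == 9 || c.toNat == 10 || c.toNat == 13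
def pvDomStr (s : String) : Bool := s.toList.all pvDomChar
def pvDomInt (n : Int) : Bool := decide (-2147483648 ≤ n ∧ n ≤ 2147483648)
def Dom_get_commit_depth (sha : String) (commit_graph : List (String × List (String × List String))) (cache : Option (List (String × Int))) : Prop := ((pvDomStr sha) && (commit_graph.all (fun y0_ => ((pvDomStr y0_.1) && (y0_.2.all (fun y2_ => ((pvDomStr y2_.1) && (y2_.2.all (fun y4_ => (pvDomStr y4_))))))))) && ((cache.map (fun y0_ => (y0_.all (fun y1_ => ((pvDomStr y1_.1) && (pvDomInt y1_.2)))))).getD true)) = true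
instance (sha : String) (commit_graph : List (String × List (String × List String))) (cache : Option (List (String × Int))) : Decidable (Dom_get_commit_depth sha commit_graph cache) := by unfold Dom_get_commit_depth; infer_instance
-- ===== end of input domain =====

-- B replaces A's top-down memoised recursion by a bottom-up saturation sweep (alternative
-- decomposition, same asymptotic order on typical inputs); equivalence is about the RETURN
-- value only: A writes every visited node into the caller's cache, B writes only sha's entry.

-- ===== PORT A =====
-- A's recursion is fueled; under Pre_get_commit_depth the fuel commit_graph.length + 2 is never
-- exhausted (A's call depth is bounded by the number of distinct graph keys plus one).
def goA (g : PySem.Dict String (List (String × List String))) :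
    Nat → String → PySem.Dict String Int → Int × PySem.Dict String Int
  | 0, _, c => (0, c)                                -- unreachable under Pre_get_commit_depth
  | n+1, sha, c =>
    match c.get? sha with
    | some v => (v, c)                               -- `if sha in cache: return cache[sha]`
    | none =>
      match g.get? sha with
      | none => (0, c.insert sha 0)                  -- `commit_graph.get(sha)` is None
      | some commit =>
        if commit.isEmpty then (0, c.insert sha 0)   -- `not commit` (empty dict)
        else
          -- `commit['parents']`: KeyError (missing key) is excluded by Pre_get_commit_depth
          let ps := ((PySem.Dict.mk commit).get? "parents").getD []
          if ps.isEmpty then (0, c.insert sha 0)     -- `not commit['parents']`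
          else
            -- `max(get_commit_depth(p, commit_graph, cache) for p in parents if p in commit_graph)`
            -- the generator threads the shared cache left to right; empty max (ValueError)
            -- is excluded by Pre_get_commit_depth, so st.1 = none never reaches the result
            let st := (ps.filter (fun p => (g.get? p).isSome)).foldl
              (fun (acc : Option Int × PySem.Dict String Int) p =>
                let r := goA g n p acc.2
                (some (match acc.1 with | none => r.1 | some m => max m r.1), r.2)) (none, c)
            let depth := 1 + st.1.getD 0
            (depth, st.2.insert sha depth)

def get_commit_depth (sha : String) (commit_graph : List (String × List (String × List String))) (cache : Option (List (String × Int))) : Int :=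
  (goA (PySem.Dict.mk commit_graph) (commit_graph.length + 2) sha (PySem.Dict.mk (cache.getD []))).1

-- ===== PORT B =====
-- one inner `for node, commit in commit_graph.items():` pass of Source B
def goBpass (g : PySem.Dict String (List (String × List String))) :
    List (String × List (String × List String)) → PySem.Dict String Int → Bool →
    PySem.Dict String Int × Bool
  | [], d, ch => (d, ch)
  | (node, commit) :: rest, d, ch =>
    if (d.get? node).isSome then goBpass g rest d ch           -- `if node in depths: continue`
    else
      let parents := (((PySem.Dict.mk commit).get? "parents").getD []).filter
        (fun p => (g.get? p).isSome)
      if parents.all (fun p => (d.get? p).isSome) then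
        let v := if parents.isEmpty then 0
                 else 1 + (PySem.List.max? (parents.map (fun p => d.getD p 0)) (fun y => y)).getD 0
        goBpass g rest (d.insert node v) true
      else goBpass g rest d ch

-- `while changed and sha not in depths:`; each pass that reports a change grows the dict, so
-- fuel commit_graph.length + 2 always reaches the exit condition
def goBloop (g : PySem.Dict String (List (String × List String)))
    (items : List (String × List (String × List String))) (sha : String) :
    Nat → PySem.Dict String Int → PySem.Dict String Int
  | 0, d => d
  | n+1, d =>
    if (d.get? sha).isSome then d
    else
      let r := goBpass g items d false
      if r.2 then goBloop g items sha n r.1 else r.1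

def get_commit_depth_alt (sha : String) (commit_graph : List (String × List (String × List String))) (cache : Option (List (String × Int))) : Int :=
  let c0 := PySem.Dict.mk (cache.getD [])
  match c0.get? sha with
  | some v => v                                       -- `if sha in cache: return cache[sha]`
  | none =>
    let d := goBloop (PySem.Dict.mk commit_graph) commit_graph sha (commit_graph.length + 2) c0
    d.getD sha 0                                      -- `depths.get(sha, 0)`

-- ===== PRECONDITION & SPEC =====
-- helpers for the precondition: the in-graph parents of a node, and local well-formedness
def pvParentsRaw (g : PySem.Dict String (List (String × List String))) (x : String) : List String :=
  match g.get? x with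
  | none => []
  | some commit => ((PySem.Dict.mk commit).get? "parents").getD []

def pvParents (g : PySem.Dict String (List (String × List String))) (x : String) : List String :=
  (pvParentsRaw g x).filter (fun p => (g.get? p).isSome)

-- node x raises no KeyError ('parents' present when its dict is non-empty) and no ValueError
-- (some parent is in the graph when its parent list is non-empty)
def pvWF (g : PySem.Dict String (List (String × List String))) (x : String) : Bool :=
  match g.get? x with
  | none => true
  | some commit =>
    commit.isEmpty ||
      (((PySem.Dict.mk commit).get? "parents").isSome &&
        ((((PySem.Dict.mk commit).get? "parents").getD []).isEmpty || !(pvParents g x).isEmpty))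

-- bounded parent-chain condition: every node reachable from x within n steps (stopping at
-- cached nodes) is well-formed; at fuel (number of graph keys)+1 this holds iff every reachable
-- node is well-formed and no cycle is reachable — a condition on the input graph, not a run of
-- either port
def pvOkA (g : PySem.Dict String (List (String × List String))) (c0 : PySem.Dict String Int) :
    Nat → String → Bool
  | 0, _ => false
  | n+1, x => (c0.get? x).isSome || (pvWF g x && (pvParents g x).all (fun p => pvOkA g c0 n p))

-- Pre_ excludes exactly (a) the inputs where Python A raises — a reachable node whose non-empty
-- dict lacks 'parents' (KeyError), whose non-empty parent list has no in-graph member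
-- (ValueError on an empty max()), or a reachable parent cycle (RecursionError) — and (b)
-- association lists with duplicate keys, which do not represent a Python dict (first-vs-last
-- value is an artefact of the list encoding; a real dict argument never has them).
def Pre_get_commit_depth (sha : String) (commit_graph : List (String × List (String × List String))) (cache : Option (List (String × Int))) : Prop :=
  pvOkA (PySem.Dict.mk commit_graph) (PySem.Dict.mk (cache.getD []))
    (commit_graph.length + 1) sha = true ∧
  (commit_graph.map Prod.fst).Nodup ∧ ((cache.getD []).map Prod.fst).Nodup

instance (sha : String) (commit_graph : List (String × List (String × List String))) (cache : Option (List (String × Int))) : Decidable (Pre_get_commit_depth sha commit_graph cache) := by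
  unfold Pre_get_commit_depth; infer_instance

def pvWitness_get_commit_depth : String × (List (String × List (String × List String))) × (Option (List (String × Int))) :=
  ("b", [("a", [("parents", [])]), ("b", [("parents", ["a", "z"])])], some [("z", 7)])

def Spec_get_commit_depth (sha : String) (commit_graph : List (String × List (String × List String))) (cache : Option (List (String × Int))) (out : Int) : Prop := out = get_commit_depth_alt sha commit_graph cache
instance (sha : String) (commit_graph : List (String × List (String × List String))) (cache : Option (List (String × Int))) (out : Int) : Decidable (Spec_get_commit_depth sha commit_graph cache out) := by unfold Spec_get_commit_depth; infer_instance

-- ===== CLAIM (what is proved, stated in full; the proofs are below) =====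
def Claim_equal_get_commit_depth : Prop := ∀ (sha : String) (commit_graph : List (String × List (String × List String))) (cache : Option (List (String × Int))), Dom_get_commit_depth sha commit_graph cache → Pre_get_commit_depth sha commit_graph cache → Spec_get_commit_depth sha commit_graph cache (get_commit_depth sha commit_graph cache)

-- ===== LEMMAS AND PROOFS =====

-- the cache-insensitive variant of pvOkA (no well-formedness), used to state values
def pvOk (g : PySem.Dict String (List (String × List String))) (c0 : PySem.Dict String Int) :
    Nat → String → Bool
  | 0, _ => false
  | n+1, x => (c0.get? x).isSome || (pvParents g x).all (fun p => pvOk g c0 n p)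

-- the depth value both programs compute, by fuel recursion
def pvDepth (g : PySem.Dict String (List (String × List String))) (c0 : PySem.Dict String Int) :
    Nat → String → Int
  | 0, _ => 0
  | n+1, x =>
    match c0.get? x with
    | some v => v
    | none =>
      if (pvParents g x).isEmpty then 0
      else 1 + (PySem.List.max? ((pvParents g x).map (pvDepth g c0 n)) (fun y => y)).getD 0

def pvVal (g : PySem.Dict String (List (String × List String))) (c0 : PySem.Dict String Int)
    (x : String) (v : Int) : Prop :=
  ∃ n, pvOk g c0 n x = true ∧ pvDepth g c0 n x = v

lemma pvOk_mono (g : PySem.Dict String (List (String × List String))) (c0 : PySem.Dict String Int) :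
    ∀ n m x, pvOk g c0 n x = true → n ≤ m → pvOk g c0 m x = true := by
  intro n
  induction n with
  | zero => intro m x h _; simp [pvOk] at h
  | succ n ih =>
    intro m x h hm
    obtain ⟨m', rfl⟩ : ∃ m', m = m' + 1 := ⟨m - 1, by omega⟩
    simp only [pvOk, Bool.or_eq_true, List.all_eq_true] at h ⊢
    rcases h with h | h
    · exact Or.inl h
    · exact Or.inr fun p hp => ih m' p (h p hp) (by omega)

lemma pvDepth_stable (g : PySem.Dict String (List (String × List String))) (c0 : PySem.Dict String Int) :
    ∀ n m x, pvOk g c0 n x = true → n ≤ m → pvDepth g c0 m x = pvDepth g c0 n x := by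
  intro n
  induction n with
  | zero => intro m x h _; simp [pvOk] at h
  | succ n ih =>
    intro m x h hm
    obtain ⟨m', rfl⟩ : ∃ m', m = m' + 1 := ⟨m - 1, by omega⟩
    simp only [pvOk, Bool.or_eq_true, List.all_eq_true] at h
    simp only [pvDepth]
    cases hc : c0.get? x with
    | some v => rfl
    | none =>
      simp only [hc] at h ⊢
      rcases h with h | h
      · simp at h
      · by_cases hp : (pvParents g x).isEmpty
        · simp [hp]
        · simp only [hp]
          have : (pvParents g x).map (pvDepth g c0 m') = (pvParents g x).map (pvDepth g c0 n) :=
            List.map_congr_left fun p hp' => ih m' p (h p hp') (by omega)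
          rw [this]

lemma pvVal_unique (g : PySem.Dict String (List (String × List String))) (c0 : PySem.Dict String Int)
    (x : String) (v w : Int) (hv : pvVal g c0 x v) (hw : pvVal g c0 x w) : v = w := by
  obtain ⟨n, hn, hvn⟩ := hv
  obtain ⟨m, hm, hwm⟩ := hw
  rcases le_total n m with h | h
  · rw [← hvn, ← hwm, pvDepth_stable g c0 n m x hn h]
  · rw [← hvn, ← hwm, pvDepth_stable g c0 m n x hm h]

lemma pvOkA_ok (g : PySem.Dict String (List (String × List String))) (c0 : PySem.Dict String Int) :
    ∀ n x, pvOkA g c0 n x = true → pvOk g c0 n x = true := by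
  intro n
  induction n with
  | zero => intro x h; simp [pvOkA] at h
  | succ n ih =>
    intro x h
    simp only [pvOkA, Bool.or_eq_true, Bool.and_eq_true, List.all_eq_true] at h
    simp only [pvOk, Bool.or_eq_true, List.all_eq_true]
    rcases h with h | ⟨_, h⟩
    · exact Or.inl h
    · exact Or.inr fun p hp => ih p (h p hp)

-- cache invariant: it extends the initial cache and every entry carries the stable value
def pvInv (g : PySem.Dict String (List (String × List String))) (c0 : PySem.Dict String Int)
    (d : PySem.Dict String Int) : Prop :=
  (∀ k v, c0.get? k = some v → d.get? k = some v) ∧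
  (∀ k v, d.get? k = some v → pvVal g c0 k v)

lemma pvInv_init (g : PySem.Dict String (List (String × List String))) (c0 : PySem.Dict String Int) :
    pvInv g c0 c0 := by
  refine ⟨fun k v hk => hk, fun k v hk => ⟨1, ?_, ?_⟩⟩
  · show pvOk g c0 (0 + 1) k = true
    simp [pvOk, hk]
  · show pvDepth g c0 (0 + 1) k = v
    simp [pvDepth, hk]

-- ===== A-side =====
lemma pvVal_zero (g : PySem.Dict String (List (String × List String))) (c0 : PySem.Dict String Int)
    (x : String) (hc0x : c0.get? x = none) (hps : pvParents g x = []) : pvVal g c0 x 0 := by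
  refine ⟨1, ?_, ?_⟩
  · show pvOk g c0 (0 + 1) x = true
    simp [pvOk, hc0x, hps]
  · show pvDepth g c0 (0 + 1) x = 0
    simp [pvDepth, hc0x, hps]

lemma pvInv_insert (g : PySem.Dict String (List (String × List String))) (c0 : PySem.Dict String Int)
    (c : PySem.Dict String Int) (x : String) (v : Int)
    (hc : pvInv g c0 c) (hval : pvVal g c0 x v) :
    pvInv g c0 (c.insert x v) ∧ (∀ k w, c.get? k = some w → (c.insert x v).get? k = some w) := by
  have key : ∀ w, c.get? x = some w → w = v :=
    fun w hw => pvVal_unique g c0 x w v (hc.2 x w hw) hval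
  have hmem : ∀ k (w : Int), c.get? k = some w → (c.insert x v).get? k = some w := by
    intro k w hk
    rw [PySem.Dict.get?_insert]
    split
    · next he => subst he; rw [key w hk]
    · exact hk
  refine ⟨⟨?_, ?_⟩, hmem⟩
  · intro k w hk
    exact hmem k w (hc.1 k w hk)
  · intro k w hk
    rw [PySem.Dict.get?_insert] at hk
    by_cases he : k = x
    · subst he
      rw [if_pos rfl] at hk
      cases hk; exact hval
    · rw [if_neg he] at hk
      exact hc.2 k w hk

lemma goA_fold (g : PySem.Dict String (List (String × List String))) (c0 : PySem.Dict String Int)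
    (n m' : Nat)
    (ih : ∀ x c, pvOkA g c0 n x = true → pvInv g c0 c →
      pvVal g c0 x (goA g m' x c).1 ∧ pvInv g c0 (goA g m' x c).2 ∧
      (∀ k v, c.get? k = some v → (goA g m' x c).2.get? k = some v)) :
    ∀ (l : List String) (a : Int) (c : PySem.Dict String Int),
      (∀ p ∈ l, pvOkA g c0 n p = true) → pvInv g c0 c →
      (l.foldl (fun (acc : Option Int × PySem.Dict String Int) p =>
          let r := goA g m' p acc.2
          (some (match acc.1 with | none => r.1 | some mm => max mm r.1), r.2)) (some a, c)).1
        = some ((l.map (pvDepth g c0 n)).foldl max a) ∧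
      pvInv g c0 (l.foldl (fun (acc : Option Int × PySem.Dict String Int) p =>
          let r := goA g m' p acc.2
          (some (match acc.1 with | none => r.1 | some mm => max mm r.1), r.2)) (some a, c)).2 ∧
      (∀ k v, c.get? k = some v →
        ((l.foldl (fun (acc : Option Int × PySem.Dict String Int) p =>
          let r := goA g m' p acc.2
          (some (match acc.1 with | none => r.1 | some mm => max mm r.1), r.2)) (some a, c)).2).get? k = some v) := by
  intro l
  induction l with
  | nil => intro a c _ hc; exact ⟨rfl, hc, fun k v hk => hk⟩
  | cons p t iht =>
    intro a c hl hc
    obtain ⟨hval, hinv, hext⟩ := ih p c (hl p (by simp)) hc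
    have hvp : (goA g m' p c).1 = pvDepth g c0 n p := by
      have hok : pvOk g c0 n p = true := pvOkA_ok g c0 n p (hl p (by simp))
      exact pvVal_unique g c0 p _ _ hval ⟨n, hok, rfl⟩
    have hstep : List.foldl (fun (acc : Option Int × PySem.Dict String Int) p =>
          let r := goA g m' p acc.2
          (some (match acc.1 with | none => r.1 | some mm => max mm r.1), r.2)) (some a, c) (p :: t)
        = List.foldl (fun (acc : Option Int × PySem.Dict String Int) p =>
          let r := goA g m' p acc.2
          (some (match acc.1 with | none => r.1 | some mm => max mm r.1), r.2))
          (some (max a (pvDepth g c0 n p)), (goA g m' p c).2) t := by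
      rw [List.foldl_cons]
      dsimp only
      rw [hvp]
    rw [hstep]
    obtain ⟨h1, h2, h3⟩ := iht (max a (pvDepth g c0 n p)) (goA g m' p c).2
      (fun q hq => hl q (by simp [hq])) hinv
    exact ⟨by rw [h1]; simp, h2, fun k v hk => h3 k v (hext k v hk)⟩

lemma goA_correct (g : PySem.Dict String (List (String × List String))) (c0 : PySem.Dict String Int) :
    ∀ n x c m, pvOkA g c0 n x = true → n ≤ m → pvInv g c0 c →
      pvVal g c0 x (goA g m x c).1 ∧ pvInv g c0 (goA g m x c).2 ∧
      (∀ k v, c.get? k = some v → (goA g m x c).2.get? k = some v) := by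
  intro n
  induction n with
  | zero => intro x c m h _ _; simp [pvOkA] at h
  | succ n ihn =>
    intro x c m h hm hc
    obtain ⟨m', rfl⟩ : ∃ m', m = m' + 1 := ⟨m - 1, by omega⟩
    have hm' : n ≤ m' := by omega
    have ih : ∀ y c', pvOkA g c0 n y = true → pvInv g c0 c' →
        pvVal g c0 y (goA g m' y c').1 ∧ pvInv g c0 (goA g m' y c').2 ∧
        (∀ k v, c'.get? k = some v → (goA g m' y c').2.get? k = some v) :=
      fun y c' hy hc' => ihn y c' m' hy hm' hc'
    simp only [pvOkA, Bool.or_eq_true, Bool.and_eq_true, List.all_eq_true] at h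
    cases hcx : c.get? x with
    | some v =>
      have heq : goA g (m' + 1) x c = (v, c) := by simp [goA, hcx]
      rw [heq]
      exact ⟨hc.2 x v hcx, hc, fun k w hk => hk⟩
    | none =>
      have hc0x : c0.get? x = none := by
        cases h0 : c0.get? x with
        | none => rfl
        | some w => rw [hc.1 x w h0] at hcx; cases hcx
      replace h : pvWF g x = true ∧ ∀ p ∈ pvParents g x, pvOkA g c0 n p = true := by
        rcases h with h | h
        · rw [hc0x] at h; simp at h
        · exact h
      cases hgx : g.get? x with
      | none =>
        have hps : pvParents g x = [] := by simp [pvParents, pvParentsRaw, hgx]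
        have heq : goA g (m' + 1) x c = (0, c.insert x 0) := by simp [goA, hcx, hgx]
        rw [heq]
        have hval := pvVal_zero g c0 x hc0x hps
        obtain ⟨hi, he⟩ := pvInv_insert g c0 c x 0 hc hval
        exact ⟨hval, hi, he⟩
      | some commit =>
        have hraw : pvParentsRaw g x = ((PySem.Dict.mk commit).get? "parents").getD [] := by
          simp [pvParentsRaw, hgx]
        cases hce : commit.isEmpty with
        | true =>
          have hps : pvParents g x = [] := by
            have : commit = [] := by cases commit <;> simp_all [List.isEmpty]
            subst this
            simp [pvParents, hraw, PySem.Dict.get?]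
          have heq : goA g (m' + 1) x c = (0, c.insert x 0) := by
            simp [goA, hcx, hgx, hce]
          rw [heq]
          have hval := pvVal_zero g c0 x hc0x hps
          obtain ⟨hi, he⟩ := pvInv_insert g c0 c x 0 hc hval
          exact ⟨hval, hi, he⟩
        | false =>
          cases hpe : (((PySem.Dict.mk commit).get? "parents").getD []).isEmpty with
          | true =>
            have hps : pvParents g x = [] := by
              have : ((PySem.Dict.mk commit).get? "parents").getD [] = [] := by
                simpa [List.isEmpty_iff] using hpe
              simp [pvParents, hraw, this]
            have heq : goA g (m' + 1) x c = (0, c.insert x 0) := by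
              simp [goA, hcx, hgx, hce, hpe]
            rw [heq]
            have hval := pvVal_zero g c0 x hc0x hps
            obtain ⟨hi, he⟩ := pvInv_insert g c0 c x 0 hc hval
            exact ⟨hval, hi, he⟩
          | false =>
            -- the recursive branch
            have hfil : pvParents g x
                = (((PySem.Dict.mk commit).get? "parents").getD []).filter
                    (fun p => (g.get? p).isSome) := by
              simp [pvParents, hraw]
            have hwf : (pvParents g x).isEmpty = false := by
              have hw := h.1
              simp only [pvWF, hgx, hce, Bool.false_or, Bool.or_eq_true, Bool.and_eq_true] at hw
              rcases hw with ⟨-, hw | hw⟩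
              · rw [hpe] at hw; cases hw
              · simpa using hw
            obtain ⟨ph, pt, hpt⟩ : ∃ ph pt, pvParents g x = ph :: pt := by
              cases hpp : pvParents g x with
              | nil => rw [hpp] at hwf; simp [List.isEmpty] at hwf
              | cons a b => exact ⟨a, b, rfl⟩
            have hfil' : (((PySem.Dict.mk commit).get? "parents").getD []).filter
                (fun p => (g.get? p).isSome) = ph :: pt := by rw [← hfil, hpt]
            have hokph : pvOkA g c0 n ph = true := h.2 ph (by rw [hpt]; simp)
            have heq : goA g (m' + 1) x c
                = (1 + ((ph :: pt).foldl (fun (acc : Option Int × PySem.Dict String Int) p =>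
                    let r := goA g m' p acc.2
                    (some (match acc.1 with | none => r.1 | some mm => max mm r.1), r.2))
                    (none, c)).1.getD 0,
                   ((ph :: pt).foldl (fun (acc : Option Int × PySem.Dict String Int) p =>
                    let r := goA g m' p acc.2
                    (some (match acc.1 with | none => r.1 | some mm => max mm r.1), r.2))
                    (none, c)).2.insert x
                    (1 + ((ph :: pt).foldl (fun (acc : Option Int × PySem.Dict String Int) p =>
                    let r := goA g m' p acc.2
                    (some (match acc.1 with | none => r.1 | some mm => max mm r.1), r.2))
                    (none, c)).1.getD 0)) := by
              simp only [goA, hcx, hgx, hce, hpe, hfil', Bool.false_eq_true, if_false]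
              norm_num
            obtain ⟨hvph, hinvph, hextph⟩ := ih ph c hokph hc
            have hvph' : (goA g m' ph c).1 = pvDepth g c0 n ph := by
              have hok : pvOk g c0 n ph = true := pvOkA_ok g c0 n ph hokph
              exact pvVal_unique g c0 ph _ _ hvph ⟨n, hok, rfl⟩
            have hstep : (ph :: pt).foldl (fun (acc : Option Int × PySem.Dict String Int) p =>
                    let r := goA g m' p acc.2
                    (some (match acc.1 with | none => r.1 | some mm => max mm r.1), r.2))
                    (none, c)
                = pt.foldl (fun (acc : Option Int × PySem.Dict String Int) p =>
                    let r := goA g m' p acc.2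
                    (some (match acc.1 with | none => r.1 | some mm => max mm r.1), r.2))
                    (some (pvDepth g c0 n ph), (goA g m' ph c).2) := by
              rw [List.foldl_cons]
              dsimp only
              rw [hvph']
            obtain ⟨h1, h2, h3⟩ := goA_fold g c0 n m' ih pt (pvDepth g c0 n ph) (goA g m' ph c).2
              (fun q hq => h.2 q (by rw [hpt]; simp [hq])) hinvph
            have hdep : (1 : Int) + ((ph :: pt).foldl
                (fun (acc : Option Int × PySem.Dict String Int) p =>
                    let r := goA g m' p acc.2
                    (some (match acc.1 with | none => r.1 | some mm => max mm r.1), r.2))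
                    (none, c)).1.getD 0
                = pvDepth g c0 (n + 1) x := by
              rw [hstep, h1]
              simp only [pvDepth, hc0x, hpt, List.isEmpty_cons, if_false, Bool.false_eq_true]
              rw [List.map_cons, PySem.List.max?_id_cons]
            have hok1 : pvOk g c0 (n + 1) x = true := by
              simp only [pvOk, Bool.or_eq_true, List.all_eq_true]
              exact Or.inr fun p hp => pvOkA_ok g c0 n p (h.2 p hp)
            have hval : pvVal g c0 x (1 + ((ph :: pt).foldl
                (fun (acc : Option Int × PySem.Dict String Int) p =>
                    let r := goA g m' p acc.2
                    (some (match acc.1 with | none => r.1 | some mm => max mm r.1), r.2))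
                    (none, c)).1.getD 0) := ⟨n + 1, hok1, hdep.symm⟩
            rw [heq]
            have hextc : ∀ k v, c.get? k = some v →
                ((ph :: pt).foldl (fun (acc : Option Int × PySem.Dict String Int) p =>
                    let r := goA g m' p acc.2
                    (some (match acc.1 with | none => r.1 | some mm => max mm r.1), r.2))
                    (none, c)).2.get? k = some v := by
              intro k v hk
              rw [hstep]
              exact h3 k v (hextph k v hk)
            have hinvst : pvInv g c0 ((ph :: pt).foldl
                (fun (acc : Option Int × PySem.Dict String Int) p =>
                    let r := goA g m' p acc.2
                    (some (match acc.1 with | none => r.1 | some mm => max mm r.1), r.2))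
                    (none, c)).2 := by rw [hstep]; exact h2
            obtain ⟨hi, he⟩ := pvInv_insert g c0 _ x _ hinvst hval
            exact ⟨hval, hi, fun k v hk => he k v (hextc k v hk)⟩
            

-- ===== B-side =====
def pvInvB (g : PySem.Dict String (List (String × List String))) (c0 : PySem.Dict String Int)
    (d : PySem.Dict String Int) : Prop :=
  pvInv g c0 d ∧ d.keys.Nodup ∧
  (∀ k, (d.get? k).isSome = true → (c0.get? k).isSome = true ∨ (g.get? k).isSome = true)

def pvSaturated (g : PySem.Dict String (List (String × List String)))
    (items : List (String × List (String × List String))) (d : PySem.Dict String Int) : Prop :=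
  ∀ nc ∈ items, (d.get? nc.1).isSome = true ∨
    ((((PySem.Dict.mk nc.2).get? "parents").getD []).filter (fun p => (g.get? p).isSome)).all
      (fun p => (d.get? p).isSome) = false

lemma goBpass_flag (g : PySem.Dict String (List (String × List String))) :
    ∀ (items : List (String × List (String × List String))) (d : PySem.Dict String Int),
      (goBpass g items d true).2 = true := by
  intro items
  induction items with
  | nil => intro d; rfl
  | cons nc rest ih =>
    obtain ⟨node, commit⟩ := nc
    intro d
    simp only [goBpass]
    split
    · exact ih d
    · split
      · exact ih _
      · exact ih d

lemma pvUniform (g : PySem.Dict String (List (String × List String))) (c0 : PySem.Dict String Int) :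
    ∀ (l : List String) (f : String → Int), (∀ p ∈ l, pvVal g c0 p (f p)) →
      ∃ N, ∀ p ∈ l, pvOk g c0 N p = true ∧ pvDepth g c0 N p = f p := by
  intro l f
  induction l with
  | nil => intro _; exact ⟨0, by simp⟩
  | cons a t ih =>
    intro h
    obtain ⟨N, hN⟩ := ih (fun p hp => h p (List.mem_cons_of_mem a hp))
    obtain ⟨n1, hok1, hd1⟩ := h a List.mem_cons_self
    refine ⟨max n1 N, ?_⟩
    intro p hp
    rcases List.mem_cons.mp hp with rfl | hp
    · exact ⟨pvOk_mono g c0 n1 (max n1 N) p hok1 (le_max_left _ _),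
        by rw [pvDepth_stable g c0 n1 (max n1 N) p hok1 (le_max_left _ _)]; exact hd1⟩
    · exact ⟨pvOk_mono g c0 N (max n1 N) p (hN p hp).1 (le_max_right _ _),
        by rw [pvDepth_stable g c0 N (max n1 N) p (hN p hp).1 (le_max_right _ _)]; exact (hN p hp).2⟩

lemma goBpass_spec (g : PySem.Dict String (List (String × List String))) (c0 : PySem.Dict String Int) :
    ∀ items d ch, pvInvB g c0 d → (∀ nc ∈ items, g.get? nc.1 = some nc.2) →
      pvInvB g c0 (goBpass g items d ch).1 ∧
      (∀ k v, d.get? k = some v → (goBpass g items d ch).1.get? k = some v) ∧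
      d.size ≤ (goBpass g items d ch).1.size ∧
      ((goBpass g items d ch).2 = false → (goBpass g items d ch).1 = d ∧ ch = false ∧
        pvSaturated g items d) ∧
      ((goBpass g items d ch).2 = true → ch = true ∨ d.size < (goBpass g items d ch).1.size) := by
  intro items
  induction items with
  | nil =>
    intro d ch h1 _
    exact ⟨h1, fun k v hk => hk, le_refl _,
      fun hf => ⟨rfl, hf, fun nc hnc => absurd hnc (List.not_mem_nil)⟩, fun ht => Or.inl ht⟩
  | cons nc rest ih =>
    obtain ⟨node, commit⟩ := nc
    intro d ch h1 h2
    have hgn : g.get? node = some commit := h2 (node, commit) List.mem_cons_self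
    have h2' : ∀ nc ∈ rest, g.get? nc.1 = some nc.2 :=
      fun nc hnc => h2 nc (List.mem_cons_of_mem _ hnc)
    cases hdn : (d.get? node).isSome with
    | true =>
      have heq : goBpass g ((node, commit) :: rest) d ch = goBpass g rest d ch := by
        simp only [goBpass]
        rw [if_pos hdn]
      rw [heq]
      obtain ⟨i1, i2, i3, i4, i5⟩ := ih d ch h1 h2'
      refine ⟨i1, i2, i3, ?_, i5⟩
      intro hf
      obtain ⟨e1, e2, e3⟩ := i4 hf
      refine ⟨e1, e2, ?_⟩
      intro nc' hnc'
      rcases List.mem_cons.mp hnc' with rfl | hm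
      · exact Or.inl hdn
      · exact e3 nc' hm
    | false =>
      cases hall : ((((PySem.Dict.mk commit).get? "parents").getD []).filter (fun p => (g.get? p).isSome)).all (fun p => (d.get? p).isSome) with
      | true =>
        have heq : goBpass g ((node, commit) :: rest) d ch
            = goBpass g rest (d.insert node (if ((((PySem.Dict.mk commit).get? "parents").getD []).filter (fun p => (g.get? p).isSome)).isEmpty then (0:Int) else 1 + (PySem.List.max? (((((PySem.Dict.mk commit).get? "parents").getD []).filter (fun p => (g.get? p).isSome)).map (fun p => d.getD p 0)) (fun y => y)).getD 0)) true := by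
          simp only [goBpass]
          rw [if_neg (by simp [hdn]), if_pos hall]
        have hc0n : c0.get? node = none := by
          cases hc : c0.get? node with
          | none => rfl
          | some w => rw [h1.1.1 node w hc] at hdn; cases hdn
        have hpar : pvParents g node = ((((PySem.Dict.mk commit).get? "parents").getD []).filter (fun p => (g.get? p).isSome)) := by
          simp [pvParents, pvParentsRaw, hgn]
        have hvals : ∀ p ∈ ((((PySem.Dict.mk commit).get? "parents").getD []).filter (fun p => (g.get? p).isSome)), pvVal g c0 p (d.getD p 0) := by
          intro p hp
          have hps : (d.get? p).isSome = true := by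
            have := List.all_eq_true.mp hall p hp
            simpa using this
          obtain ⟨w, hw⟩ := Option.isSome_iff_exists.mp hps
          rw [PySem.Dict.getD_eq_get?_getD, hw]
          exact h1.1.2 p w hw
        obtain ⟨N, hN⟩ := pvUniform g c0 ((((PySem.Dict.mk commit).get? "parents").getD []).filter (fun p => (g.get? p).isSome)) (fun p => d.getD p 0) hvals
        have hokN : pvOk g c0 (N + 1) node = true := by
          simp only [pvOk, Bool.or_eq_true, List.all_eq_true]
          refine Or.inr ?_
          rw [hpar]
          intro p hp
          exact (hN p hp).1
        have hdN : pvDepth g c0 (N + 1) node = (if ((((PySem.Dict.mk commit).get? "parents").getD []).filter (fun p => (g.get? p).isSome)).isEmpty then (0:Int) else 1 + (PySem.List.max? (((((PySem.Dict.mk commit).get? "parents").getD []).filter (fun p => (g.get? p).isSome)).map (fun p => d.getD p 0)) (fun y => y)).getD 0) := by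
          simp only [pvDepth, hc0n, hpar]
          by_cases hpe : ((((PySem.Dict.mk commit).get? "parents").getD []).filter (fun p => (g.get? p).isSome)).isEmpty
          · simp [hpe]
          · simp only [hpe]
            have hmap : ((((PySem.Dict.mk commit).get? "parents").getD []).filter (fun p => (g.get? p).isSome)).map (pvDepth g c0 N) = ((((PySem.Dict.mk commit).get? "parents").getD []).filter (fun p => (g.get? p).isSome)).map (fun p => d.getD p 0) :=
              List.map_congr_left fun p hp => (hN p hp).2
            rw [hmap]
        have hval : pvVal g c0 node (if ((((PySem.Dict.mk commit).get? "parents").getD []).filter (fun p => (g.get? p).isSome)).isEmpty then (0:Int) else 1 + (PySem.List.max? (((((PySem.Dict.mk commit).get? "parents").getD []).filter (fun p => (g.get? p).isSome)).map (fun p => d.getD p 0)) (fun y => y)).getD 0) := ⟨N + 1, hokN, hdN⟩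
        obtain ⟨ii, iext⟩ := pvInv_insert g c0 d node (if ((((PySem.Dict.mk commit).get? "parents").getD []).filter (fun p => (g.get? p).isSome)).isEmpty then (0:Int) else 1 + (PySem.List.max? (((((PySem.Dict.mk commit).get? "parents").getD []).filter (fun p => (g.get? p).isSome)).map (fun p => d.getD p 0)) (fun y => y)).getD 0) h1.1 hval
        have hinvB1 : pvInvB g c0 (d.insert node (if ((((PySem.Dict.mk commit).get? "parents").getD []).filter (fun p => (g.get? p).isSome)).isEmpty then (0:Int) else 1 + (PySem.List.max? (((((PySem.Dict.mk commit).get? "parents").getD []).filter (fun p => (g.get? p).isSome)).map (fun p => d.getD p 0)) (fun y => y)).getD 0)) := by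
          refine ⟨ii, PySem.Dict.nodup_keys_insert d node (if ((((PySem.Dict.mk commit).get? "parents").getD []).filter (fun p => (g.get? p).isSome)).isEmpty then (0:Int) else 1 + (PySem.List.max? (((((PySem.Dict.mk commit).get? "parents").getD []).filter (fun p => (g.get? p).isSome)).map (fun p => d.getD p 0)) (fun y => y)).getD 0) h1.2.1, ?_⟩
          intro k hk
          by_cases he : k = node
          · subst he
            exact Or.inr (by rw [hgn]; rfl)
          · rw [PySem.Dict.get?_insert, if_neg he] at hk
            exact h1.2.2 k hk
        have hsz : d.size < (d.insert node (if ((((PySem.Dict.mk commit).get? "parents").getD []).filter (fun p => (g.get? p).isSome)).isEmpty then (0:Int) else 1 + (PySem.List.max? (((((PySem.Dict.mk commit).get? "parents").getD []).filter (fun p => (g.get? p).isSome)).map (fun p => d.getD p 0)) (fun y => y)).getD 0)).size := by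
          rw [PySem.Dict.size_insert, PySem.Dict.contains_eq_isSome_get?, hdn]
          simp
        rw [heq]
        obtain ⟨i1, i2, i3, i4, i5⟩ := ih (d.insert node (if ((((PySem.Dict.mk commit).get? "parents").getD []).filter (fun p => (g.get? p).isSome)).isEmpty then (0:Int) else 1 + (PySem.List.max? (((((PySem.Dict.mk commit).get? "parents").getD []).filter (fun p => (g.get? p).isSome)).map (fun p => d.getD p 0)) (fun y => y)).getD 0)) true hinvB1 h2'
        refine ⟨i1, fun k w hk => i2 k w (iext k w hk), by omega, ?_, ?_⟩
        · intro hf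
          rw [goBpass_flag g rest (d.insert node (if ((((PySem.Dict.mk commit).get? "parents").getD []).filter (fun p => (g.get? p).isSome)).isEmpty then (0:Int) else 1 + (PySem.List.max? (((((PySem.Dict.mk commit).get? "parents").getD []).filter (fun p => (g.get? p).isSome)).map (fun p => d.getD p 0)) (fun y => y)).getD 0))] at hf
          cases hf
        · intro _
          exact Or.inr (by omega)
      | false =>
        have heq : goBpass g ((node, commit) :: rest) d ch = goBpass g rest d ch := by
          simp only [goBpass]
          rw [if_neg (by simp [hdn]), if_neg (by simp [hall])]
        rw [heq]
        obtain ⟨i1, i2, i3, i4, i5⟩ := ih d ch h1 h2'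
        refine ⟨i1, i2, i3, ?_, i5⟩
        intro hf
        obtain ⟨e1, e2, e3⟩ := i4 hf
        refine ⟨e1, e2, ?_⟩
        intro nc' hnc'
        rcases List.mem_cons.mp hnc' with rfl | hm
        · exact Or.inr hall
        · exact e3 nc' hm

lemma pvSizeBound (g : PySem.Dict String (List (String × List String))) (c0 : PySem.Dict String Int)
    (items : List (String × List (String × List String)))
    (hg : g = PySem.Dict.mk items) (d : PySem.Dict String Int) (hd : pvInvB g c0 d) :
    d.size ≤ c0.size + items.length := by
  have hsub : d.keys ⊆ c0.keys ++ items.map Prod.fst := by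
    intro k hk
    have hks : (d.get? k).isSome = true := by
      cases hgk : d.get? k with
      | none => exact absurd hk ((PySem.Dict.get?_eq_none_iff_not_mem_keys d k).mp hgk)
      | some v => rfl
    rcases hd.2.2 k hks with h | h
    · apply List.mem_append_left
      by_contra hkn
      rw [(PySem.Dict.get?_eq_none_iff_not_mem_keys c0 k).mpr hkn] at h
      cases h
    · apply List.mem_append_right
      have hkeys : g.keys = items.map Prod.fst := by subst hg; rfl
      by_contra hkn
      rw [(PySem.Dict.get?_eq_none_iff_not_mem_keys g k).mpr (by rw [hkeys]; exact hkn)] at h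
      cases h
  have hsp := (List.subperm_of_subset hd.2.1 hsub).length_le
  have h1 : d.keys.length = d.size := by simp [PySem.Dict.keys, PySem.Dict.size]
  have h2 : c0.keys.length = c0.size := by simp [PySem.Dict.keys, PySem.Dict.size]
  rw [List.length_append, List.length_map, h1, h2] at hsp
  exact hsp

lemma goBloop_spec (g : PySem.Dict String (List (String × List String))) (c0 : PySem.Dict String Int)
    (items : List (String × List (String × List String))) (sha : String)
    (hg : g = PySem.Dict.mk items) (hnd : (items.map Prod.fst).Nodup) :
    ∀ fuel d, pvInvB g c0 d → c0.size + items.length + 1 ≤ fuel + d.size →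
      pvInvB g c0 (goBloop g items sha fuel d) ∧
      (((goBloop g items sha fuel d).get? sha).isSome = true ∨
        pvSaturated g items (goBloop g items sha fuel d)) := by
  have hitems : ∀ nc ∈ items, g.get? nc.1 = some nc.2 := by
    intro nc hnc
    obtain ⟨a, b⟩ := nc
    apply PySem.Dict.get?_of_mem_items
    · rw [hg]; exact hnc
    · have hkeys : g.keys = items.map Prod.fst := by subst hg; rfl
      rw [hkeys]; exact hnd
  intro fuel
  induction fuel with
  | zero =>
    intro d h1 hsz
    have := pvSizeBound g c0 items hg d h1
    omega
  | succ fuel ih =>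
    intro d h1 hsz
    cases hds : (d.get? sha).isSome with
    | true =>
      have heq : goBloop g items sha (fuel + 1) d = d := by
        simp only [goBloop]
        rw [if_pos hds]
      rw [heq]
      exact ⟨h1, Or.inl hds⟩
    | false =>
      obtain ⟨p1, p2, p3, p4, p5⟩ := goBpass_spec g c0 items d false h1 hitems
      cases hfl : (goBpass g items d false).2 with
      | false =>
        obtain ⟨e1, e2, e3⟩ := p4 hfl
        have heq : goBloop g items sha (fuel + 1) d = d := by
          simp only [goBloop]
          rw [if_neg (by simp [hds]), hfl]
          simpa using e1
        rw [heq]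
        exact ⟨h1, Or.inr e3⟩
      | true =>
        have hlt : d.size < (goBpass g items d false).1.size := by
          rcases p5 hfl with h | h
          · cases h
          · exact h
        have heq : goBloop g items sha (fuel + 1) d
            = goBloop g items sha fuel (goBpass g items d false).1 := by
          simp only [goBloop]
          rw [if_neg (by simp [hds]), hfl]
          simp
        rw [heq]
        exact ih (goBpass g items d false).1 p1 (by omega)

lemma okA_resolved (g : PySem.Dict String (List (String × List String))) (c0 : PySem.Dict String Int)
    (items : List (String × List (String × List String))) (d : PySem.Dict String Int)
    (hg : g = PySem.Dict.mk items)
    (hsat : pvSaturated g items d) (hinv : pvInv g c0 d) :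
    ∀ n x, pvOkA g c0 n x = true → (g.get? x).isSome = true → (d.get? x).isSome = true := by
  intro n
  induction n with
  | zero => intro x h _; simp [pvOkA] at h
  | succ n ih =>
    intro x h hx
    simp only [pvOkA, Bool.or_eq_true, Bool.and_eq_true, List.all_eq_true] at h
    rcases h with h | ⟨hwf, hps⟩
    · obtain ⟨w, hw⟩ := Option.isSome_iff_exists.mp h
      rw [hinv.1 x w hw]
      rfl
    · obtain ⟨commit, hgx⟩ := Option.isSome_iff_exists.mp hx
      have hmem : (x, commit) ∈ items := by
        have hh := PySem.Dict.mem_items_of_get?_eq_some g hgx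
        rw [hg] at hh
        exact hh
      rcases hsat (x, commit) hmem with hres | hbad
      · exact hres
      · exfalso
        have hpar : pvParents g x
            = (((PySem.Dict.mk commit).get? "parents").getD []).filter
                (fun p => (g.get? p).isSome) := by
          simp [pvParents, pvParentsRaw, hgx]
        have hgood : ((((PySem.Dict.mk commit).get? "parents").getD []).filter
            (fun p => (g.get? p).isSome)).all (fun p => (d.get? p).isSome) = true := by
          rw [List.all_eq_true]
          intro p hp
          rw [← hpar] at hp
          have hpg : (g.get? p).isSome = true := by
            have := List.mem_filter.mp (by rw [hpar] at hp; exact hp)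
            simpa using this.2
          exact ih p (hps p hp) hpg
        rw [hgood] at hbad
        cases hbad

-- ===== VERDICT (by name: the statement is the Claim_ definition above) =====
theorem get_commit_depth_spec : Claim_equal_get_commit_depth := by
  intro sha cg cache _ hpre
  unfold Spec_get_commit_depth
  obtain ⟨hok, hndg, hndc⟩ := hpre
  have hinv0 : pvInv (PySem.Dict.mk cg) (PySem.Dict.mk (cache.getD []))
      (PySem.Dict.mk (cache.getD [])) := pvInv_init _ _
  obtain ⟨hvalA, -, -⟩ := goA_correct (PySem.Dict.mk cg) (PySem.Dict.mk (cache.getD []))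
    (cg.length + 1) sha (PySem.Dict.mk (cache.getD [])) (cg.length + 2) hok (by omega) hinv0
  unfold get_commit_depth get_commit_depth_alt
  cases hc0s : (PySem.Dict.mk (cache.getD [])).get? sha with
  | some v =>
    simp only [hc0s]
    exact pvVal_unique _ _ sha _ v hvalA (hinv0.2 sha v hc0s)
  | none =>
    simp only [hc0s]
    have hInvB0 : pvInvB (PySem.Dict.mk cg) (PySem.Dict.mk (cache.getD []))
        (PySem.Dict.mk (cache.getD [])) := by
      refine ⟨hinv0, ?_, fun k hk => Or.inl hk⟩
      have hkeys : (PySem.Dict.mk (cache.getD [])).keys = (cache.getD []).map Prod.fst := rfl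
      rw [hkeys]
      exact hndc
    have hsz : (PySem.Dict.mk (cache.getD [])).size + cg.length + 1
        ≤ (cg.length + 2) + (PySem.Dict.mk (cache.getD [])).size := by omega
    obtain ⟨hIB, hdisj⟩ := goBloop_spec (PySem.Dict.mk cg) (PySem.Dict.mk (cache.getD []))
      cg sha rfl hndg (cg.length + 2) (PySem.Dict.mk (cache.getD [])) hInvB0 hsz
    rcases hdisj with hsome | hsat
    · obtain ⟨w, hw⟩ := Option.isSome_iff_exists.mp hsome
      rw [PySem.Dict.getD_of_get?_eq_some _ 0 hw]
      exact pvVal_unique _ _ sha _ w hvalA (hIB.1.2 sha w hw)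
    · cases hgs : (PySem.Dict.mk cg).get? sha with
      | some commit =>
        have hres := okA_resolved (PySem.Dict.mk cg) (PySem.Dict.mk (cache.getD []))
          cg _ rfl hsat hIB.1 (cg.length + 1) sha hok (by rw [hgs]; rfl)
        obtain ⟨w, hw⟩ := Option.isSome_iff_exists.mp hres
        rw [PySem.Dict.getD_of_get?_eq_some _ 0 hw]
        exact pvVal_unique _ _ sha _ w hvalA (hIB.1.2 sha w hw)
      | none =>
        have hdn : (goBloop (PySem.Dict.mk cg) cg sha (cg.length + 2)
            (PySem.Dict.mk (cache.getD []))).get? sha = none := by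
          cases hd : (goBloop (PySem.Dict.mk cg) cg sha (cg.length + 2)
              (PySem.Dict.mk (cache.getD []))).get? sha with
          | none => rfl
          | some w =>
            rcases hIB.2.2 sha (by rw [hd]; rfl) with h | h
            · rw [hc0s] at h; cases h
            · rw [hgs] at h; cases h
        rw [PySem.Dict.getD_of_get?_eq_none _ 0 hdn]
        have hps : pvParents (PySem.Dict.mk cg) sha = [] := by
          simp [pvParents, pvParentsRaw, hgs]
        exact pvVal_unique _ _ sha _ 0 hvalA (pvVal_zero _ _ sha hc0s hps)
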